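-- pv_equiv track=rewrite | github.com/jjina-kkom/3AIM-seq | 4_In_silico_Data/4-1_Standard_Based_Linear_Regression_Modeling.py | Finding_Peak
-- ===== SOURCE A (Python) =====
-- def Finding_Peak(positions, values, cutoff):
--     continuousLoc_lst, collection_lst = [], []
--
--     for pos, value in zip(positions, values):
--         if value > 0:
--             continuousLoc_lst.append(pos)
--         else:
--             if len(continuousLoc_lst) >= cutoff:
--                 collection_lst.append(continuousLoc_lst[-1])
--             continuousLoc_lst = []
--
--     if len(continuousLoc_lst) >= cutoff:
--         collection_lst.append(continuousLoc_lst[-1])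
--
--     return collection_lst
-- ===== SOURCE B (Python) =====
-- def Finding_Peak(positions, values, cutoff):
--     n = min(len(positions), len(values))
--     pos = [values[i] > 0 for i in range(n)]
--     starts = [i for i in range(n) if pos[i] and (i == 0 or not pos[i - 1])]
--     ends = [i for i in range(n) if pos[i] and (i == n - 1 or not pos[i + 1])]
--     return [positions[e] for s, e in zip(starts, ends) if e - s + 1 >= cutoff]
-- ===== Notes on version B (the rewrite author's own statement) =====
-- stated objective: alternative
-- what changed: B replaces A's single-pass run accumulator (append/flush with sentinel reset and duplicated post-loop flush) by staged boundary detection: it marks positivity, finds run-start and run-end indices by purely local neighbour comparisons, pairs them with zip, and emits positions[end] for pairs with end-start+1 >= cutoff.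
-- outside the precondition, e.g. on Finding_Peak([5], [0], 0): A raises IndexError, B returns []
import Mathlib
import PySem

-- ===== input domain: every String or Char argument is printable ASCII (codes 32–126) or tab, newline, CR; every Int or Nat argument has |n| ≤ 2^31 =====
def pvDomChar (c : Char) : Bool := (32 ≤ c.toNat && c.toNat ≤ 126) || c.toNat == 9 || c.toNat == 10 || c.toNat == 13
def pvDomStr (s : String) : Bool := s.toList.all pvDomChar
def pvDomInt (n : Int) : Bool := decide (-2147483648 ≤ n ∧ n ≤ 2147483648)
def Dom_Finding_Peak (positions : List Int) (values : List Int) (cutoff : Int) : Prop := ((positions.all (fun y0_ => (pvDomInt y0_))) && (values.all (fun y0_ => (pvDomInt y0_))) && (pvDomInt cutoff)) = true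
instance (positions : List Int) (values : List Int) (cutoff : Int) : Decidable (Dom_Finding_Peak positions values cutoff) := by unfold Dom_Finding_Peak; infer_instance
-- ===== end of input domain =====

-- B replaces A's single-pass run accumulator (append/flush with sentinel reset and a duplicated
-- post-loop flush) by staged boundary detection: mark positivity, find run-start and run-end indices
-- by local neighbour comparisons, pair them with zip, keep pairs with end-start+1 >= cutoff.
-- Same O(n) cost; a genuinely different algorithm, not claimed faster.


-- ===== PORT A =====
-- one loop step of A: append to the running list on value>0, else flush (length check, [-1]) and reset.
-- 'continuousLoc_lst[-1]' is PySem.List.pyGet? st.1 (-1): none = Python's IndexError, reached only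
-- outside Pre_Finding_Peak; '.getD 0' there only totalises the port.
def FP_step (cutoff : Int) (st : List Int × List Int) (pv : Int × Int) : List Int × List Int :=
  if pv.2 > 0 then (st.1 ++ [pv.1], st.2)
  else if (st.1.length : Int) ≥ cutoff then
    ([], st.2 ++ [(PySem.List.pyGet? st.1 (-1)).getD 0])
  else ([], st.2)

def Finding_Peak (positions : List Int) (values : List Int) (cutoff : Int) : List Int :=
  let st := (positions.zip values).foldl (FP_step cutoff) ([], [])
  if (st.1.length : Int) ≥ cutoff then st.2 ++ [(PySem.List.pyGet? st.1 (-1)).getD 0]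
  else st.2

-- ===== PORT B =====
-- pos = [values[i] > 0 for i in range(n)]
def FPB_pos (values : List Int) (n : Nat) : List Bool :=
  (List.range n).map (fun i => decide (values.getD i 0 > 0))

-- starts = [i for i in range(n) if pos[i] and (i == 0 or not pos[i-1])]
-- (pos[i-1]/pos[i+1] are reached only behind the short-circuiting disjunct, so every Python
--  access is in range; getD with default false returns the same Bool on every reached index)
def FPB_starts (pos : List Bool) (n : Nat) : List Nat :=
  (List.range n).filter (fun i => pos.getD i false && (i == 0 || !pos.getD (i - 1) false))

-- ends = [i for i in range(n) if pos[i] and (i == n-1 or not pos[i+1])]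
def FPB_ends (pos : List Bool) (n : Nat) : List Nat :=
  (List.range n).filter (fun i => pos.getD i false && (i == n - 1 || !pos.getD (i + 1) false))

-- return [positions[e] for s, e in zip(starts, ends) if e - s + 1 >= cutoff]
def Finding_Peak_alt (positions : List Int) (values : List Int) (cutoff : Int) : List Int :=
  let n := min positions.length values.length
  let pos := FPB_pos values n
  (((FPB_starts pos n).zip (FPB_ends pos n)).filter
      (fun se => decide ((se.2 : Int) - (se.1 : Int) + 1 ≥ cutoff))).map
    (fun se => positions.getD se.2 0)

-- ===== PRECONDITION & SPEC =====
-- Pre_ is exactly the set of inputs where A returns: A raises IndexError ('continuousLoc_lst[-1]' on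
-- the empty list) iff cutoff ≤ 0 and some length check happens on an empty running list, i.e. iff the
-- zipped stream is empty, starts or ends with a non-positive value, or has two consecutive non-positive values.
def Pre_Finding_Peak (positions : List Int) (values : List Int) (cutoff : Int) : Prop :=
  1 ≤ cutoff ∨
    ((positions.zip values) ≠ [] ∧
     (∀ p ∈ (positions.zip values).head?.toList, 0 < p.2) ∧
     (∀ p ∈ (positions.zip values).getLast?.toList, 0 < p.2) ∧
     (positions.zip values).IsChain (fun a b => 0 < a.2 ∨ 0 < b.2))
instance (positions : List Int) (values : List Int) (cutoff : Int) : Decidable (Pre_Finding_Peak positions values cutoff) := by unfold Pre_Finding_Peak; infer_instance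

def pvWitness_Finding_Peak : List Int × List Int × Int := ([1, 2, 3], [1, 1, 0], 2)

def Spec_Finding_Peak (positions : List Int) (values : List Int) (cutoff : Int) (out : List Int) : Prop := out = Finding_Peak_alt positions values cutoff
instance (positions : List Int) (values : List Int) (cutoff : Int) (out : List Int) : Decidable (Spec_Finding_Peak positions values cutoff out) := by unfold Spec_Finding_Peak; infer_instance

-- ===== CLAIM (what is proved, stated in full; the proofs are below) =====
def Claim_equal_Finding_Peak : Prop := ∀ (positions : List Int) (values : List Int) (cutoff : Int), Dom_Finding_Peak positions values cutoff → Pre_Finding_Peak positions values cutoff → Spec_Finding_Peak positions values cutoff (Finding_Peak positions values cutoff)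

-- ===== LEMMAS AND PROOFS =====

-- ---- A-side characterisation ----

-- what one flush (length check + append of the last element) contributes
def FP_flush (cutoff : Int) (cur : List Int) : List Int :=
  if (cur.length : Int) ≥ cutoff then [(PySem.List.pyGet? cur (-1)).getD 0] else []

-- element-by-element spec of A's loop: the output still to be produced from running list `cur`
def FP_spec (cutoff : Int) : List (Int × Int) → List Int → List Int
  | [], cur => FP_flush cutoff cur
  | p :: rest, cur =>
    if p.2 > 0 then FP_spec cutoff rest (cur ++ [p.1])
    else FP_flush cutoff cur ++ FP_spec cutoff rest []

theorem FP_A_eq_spec (cutoff : Int) (l : List (Int × Int)) (cur col : List Int) :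
    (let st := l.foldl (FP_step cutoff) (cur, col)
     if (st.1.length : Int) ≥ cutoff then st.2 ++ [(PySem.List.pyGet? st.1 (-1)).getD 0] else st.2)
      = col ++ FP_spec cutoff l cur := by
  induction l generalizing cur col with
  | nil =>
    simp only [List.foldl_nil, FP_spec, FP_flush]
    split <;> simp
  | cons p rest ih =>
    simp only [List.foldl_cons, FP_spec, FP_step]
    by_cases hp : p.2 > 0
    · simp only [if_pos hp]
      exact ih (cur ++ [p.1]) col
    · simp only [if_neg hp, FP_flush]
      by_cases hl : (cur.length : Int) ≥ cutoff
      · simp only [if_pos hl]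
        rw [ih [] (col ++ [(PySem.List.pyGet? cur (-1)).getD 0])]
        simp
      · simp only [if_neg hl]
        rw [ih [] col]
        simp

theorem FP_spec_pos_append (cutoff : Int) (grp r : List (Int × Int)) (cur : List Int)
    (h : ∀ q ∈ grp, 0 < q.2) :
    FP_spec cutoff (grp ++ r) cur = FP_spec cutoff r (cur ++ grp.map Prod.fst) := by
  induction grp generalizing cur with
  | nil => simp
  | cons q grp ih =>
    have hq : 0 < q.2 := h q (by simp)
    simp only [List.cons_append, FP_spec, if_pos hq]
    rw [ih _ (fun x hx => h x (by simp [hx]))]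
    simp

theorem flush_run (c : Int) (run : List (Int × Int)) (hne : run ≠ []) :
    FP_flush c (run.map Prod.fst) =
      if (run.length : Int) ≥ c then [(run.getD (run.length - 1) (0, 0)).1] else [] := by
  have hlen : 0 < run.length := List.length_pos_iff.mpr hne
  have h1 : run.length - 1 < run.length := by omega
  have hsome : run[run.length - 1]? = some run[run.length - 1] := List.getElem?_eq_getElem h1
  unfold FP_flush
  rw [PySem.List.pyGet?_neg_one, List.getLast?_eq_getElem?]
  simp [hsome, List.getD_eq_getElem _ _ h1]

-- ---- B-side characterisation over the zipped list ----

def posb (l : List (Int × Int)) (i : Nat) : Bool := decide ((l.getD i (0, 0)).2 > 0)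

def startsL (l : List (Int × Int)) : List Nat :=
  (List.range l.length).filter (fun i => posb l i && (i == 0 || !posb l (i - 1)))

def endsL (l : List (Int × Int)) : List Nat :=
  (List.range l.length).filter (fun i => posb l i && (i == l.length - 1 || !posb l (i + 1)))

def BoutL (cutoff : Int) (l : List (Int × Int)) : List Int :=
  (((startsL l).zip (endsL l)).filter
      (fun se => decide ((se.2 : Int) - (se.1 : Int) + 1 ≥ cutoff))).map
    (fun se => (l.getD se.2 (0, 0)).1)

-- recursive models of the two index filters
def sA (prev : Bool) : List (Int × Int) → List Nat
  | [] => []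
  | p :: rest => (if decide (p.2 > 0) && !prev then [0] else []) ++ (sA (decide (p.2 > 0)) rest).map (· + 1)

def eA : List (Int × Int) → List Nat
  | [] => []
  | [p] => if decide (p.2 > 0) then [0] else []
  | p :: q :: rest => (if decide (p.2 > 0) && !decide (q.2 > 0) then [0] else []) ++ (eA (q :: rest)).map (· + 1)

theorem startsL_eq_aux : ∀ (l : List (Int × Int)) (prev : Bool),
    (List.range l.length).filter
      (fun i => posb l i && (if i == 0 then !prev else !posb l (i - 1))) = sA prev l := by
  intro l
  induction l with
  | nil => intro prev; rfl
  | cons p rest ih =>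
    intro prev
    rw [List.length_cons, List.range_succ_eq_map, List.filter_cons, List.filter_map]
    have hstep : ∀ i ∈ List.range rest.length,
        ((fun i => posb (p :: rest) i && (if i == 0 then !prev else !posb (p :: rest) (i - 1))) ∘ Nat.succ) i
          = (fun i => posb rest i && (if i == 0 then !(decide (p.2 > 0)) else !posb rest (i - 1))) i := by
      intro i _
      cases i with
      | zero => rfl
      | succ j => rfl
    rw [List.filter_congr hstep, ih (decide (p.2 > 0))]
    have hmap : List.map Nat.succ (sA (decide (p.2 > 0)) rest) = (sA (decide (p.2 > 0)) rest).map (· + 1) :=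
      List.map_congr_left (fun a _ => Nat.succ_eq_add_one a)
    rw [hmap]
    simp only [sA]
    by_cases hp : p.2 > 0 <;> by_cases hv : prev <;> simp [posb, hp, hv]

theorem startsL_eq (l : List (Int × Int)) : startsL l = sA false l := by
  rw [← startsL_eq_aux l false]
  unfold startsL
  exact List.filter_congr (fun i _ => by cases i <;> simp)

theorem endsL_eq : ∀ (l : List (Int × Int)), endsL l = eA l := by
  intro l
  induction l with
  | nil => rfl
  | cons p rest ih =>
    cases rest with
    | nil =>
      by_cases hp : p.2 > 0 <;> simp [endsL, eA, posb, List.filter, hp]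
    | cons q t =>
      unfold endsL at ih ⊢
      rw [List.length_cons, List.range_succ_eq_map, List.filter_cons, List.filter_map]
      have hstep : ∀ i ∈ List.range (q :: t).length,
          ((fun i => posb (p :: q :: t) i &&
              (i == (q :: t).length + 1 - 1 || !posb (p :: q :: t) (i + 1))) ∘ Nat.succ) i
            = (fun i => posb (q :: t) i && (i == (q :: t).length - 1 || !posb (q :: t) (i + 1))) i := by
        intro i _
        simp only [Function.comp_apply]
        have h1 : posb (p :: q :: t) (i + 1) = posb (q :: t) i := rfl
        have h2 : posb (p :: q :: t) (i + 1 + 1) = posb (q :: t) (i + 1) := rfl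
        have h3 : (i + 1 == (q :: t).length + 1 - 1) = (i == (q :: t).length - 1) := by
          simp only [List.length_cons, Nat.add_sub_cancel]
          apply Bool.eq_iff_iff.mpr
          simp only [beq_iff_eq]
          omega
        rw [Nat.succ_eq_add_one, h1, h2, h3]
      rw [List.filter_congr hstep, ih]
      have hmap : List.map Nat.succ (eA (q :: t)) = (eA (q :: t)).map (· + 1) :=
        List.map_congr_left (fun a _ => rfl)
      rw [hmap]
      have h0 : (0 == (q :: t).length + 1 - 1) = false := by simp
      by_cases hp : p.2 > 0 <;> by_cases hq : q.2 > 0 <;>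
        simp [eA, posb, hp, hq, h0]

-- boundary: the suffix after a maximal positive run is empty or starts non-positive
def FP_bdry (l : List (Int × Int)) : Prop := l = [] ∨ ∃ q t, l = q :: t ∧ ¬ q.2 > 0

theorem sA_cons_nonpos (p : Int × Int) (rest : List (Int × Int)) (hp : ¬ p.2 > 0) :
    sA false (p :: rest) = (sA false rest).map (· + 1) := by
  simp [sA, hp]

theorem eA_cons_nonpos (p : Int × Int) (rest : List (Int × Int)) (hp : ¬ p.2 > 0) :
    eA (p :: rest) = (eA rest).map (· + 1) := by
  cases rest <;> simp [eA, hp]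

theorem sA_true_bdry (l : List (Int × Int)) (hb : FP_bdry l) : sA true l = sA false l := by
  rcases hb with rfl | ⟨q, t, rfl, hq⟩
  · rfl
  · simp [sA, hq]

theorem map_add_add (xs : List Nat) (k m : Nat) :
    (xs.map (· + k)).map (· + m) = xs.map (· + (k + m)) := by
  induction xs with
  | nil => rfl
  | cons a xs ih => simp only [List.map_cons, ih]; rw [Nat.add_assoc]

theorem sA_true_run : ∀ (rs rest' : List (Int × Int)), (∀ p ∈ rs, p.2 > 0) → FP_bdry rest' →
    sA true (rs ++ rest') = (sA false rest').map (· + rs.length) := by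
  intro rs
  induction rs with
  | nil =>
    intro rest' _ hb
    simpa using sA_true_bdry rest' hb
  | cons r rs ih =>
    intro rest' hpos hb
    have hr : r.2 > 0 := hpos r (by simp)
    rw [List.cons_append]
    simp only [sA, decide_eq_true hr, Bool.not_true, Bool.and_false, if_neg (by simp : ¬ False),
      List.nil_append]
    rw [ih rest' (fun p hp => hpos p (by simp [hp])) hb, map_add_add]
    simp [List.length_cons]

theorem sA_run (run rest' : List (Int × Int)) (hne : run ≠ []) (hpos : ∀ p ∈ run, p.2 > 0)
    (hb : FP_bdry rest') :
    sA false (run ++ rest') = 0 :: (sA false rest').map (· + run.length) := by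
  cases run with
  | nil => exact absurd rfl hne
  | cons r0 rs =>
    have hr : r0.2 > 0 := hpos r0 (by simp)
    rw [List.cons_append]
    simp only [sA, decide_eq_true hr, Bool.not_false, Bool.and_true, if_pos trivial]
    rw [sA_true_run rs rest' (fun p hp => hpos p (by simp [hp])) hb, map_add_add]
    simp [List.length_cons]

theorem eA_run : ∀ (run rest' : List (Int × Int)), run ≠ [] → (∀ p ∈ run, p.2 > 0) → FP_bdry rest' →
    eA (run ++ rest') = (run.length - 1) :: (eA rest').map (· + run.length) := by
  intro run
  induction run with
  | nil => intro rest' h _ _; exact absurd rfl h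
  | cons r0 rs ih =>
    intro rest' _ hpos hb
    have hr0 : r0.2 > 0 := hpos r0 (by simp)
    cases rs with
    | nil =>
      rcases hb with rfl | ⟨q, t, rfl, hq⟩
      · simp [eA, hr0]
      · rw [List.singleton_append]
        simp [eA, hr0, hq]
    | cons r1 rs' =>
      have hr1 : r1.2 > 0 := hpos r1 (by simp)
      have hih := ih rest' (by simp) (fun p hp => hpos p (by simp [hp])) hb
      rw [List.cons_append] at hih
      rw [List.cons_append, List.cons_append]
      simp only [eA, decide_eq_true hr0, decide_eq_true hr1, Bool.not_true, Bool.and_false,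
        if_neg (by simp : ¬ False), List.nil_append]
      rw [hih, List.map_cons, map_add_add]
      simp only [List.length_cons, Nat.add_sub_cancel]
      simp

theorem BoutL_tail (c : Int) (l l' : List (Int × Int)) (k : Nat)
    (hG : ∀ i ∈ endsL l', (l.getD (i + k) (0, 0)).1 = (l'.getD i (0, 0)).1) :
    ((((startsL l').map (· + k)).zip ((endsL l').map (· + k))).filter
        (fun se => decide ((se.2 : Int) - (se.1 : Int) + 1 ≥ c))).map
      (fun se => (l.getD se.2 (0, 0)).1) = BoutL c l' := by
  unfold BoutL
  rw [List.zip_map, List.filter_map, List.map_map]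
  rw [List.filter_congr (fun se _ => ?_)]
  · apply List.map_congr_left
    intro se hse
    have hmem : se ∈ (startsL l').zip (endsL l') := List.mem_of_mem_filter hse
    have h2 : se.2 ∈ endsL l' := by
      obtain ⟨a, b⟩ := se
      exact (List.of_mem_zip hmem).2
    simp only [Function.comp, Prod.map]
    exact hG se.2 h2
  · simp only [Function.comp, Prod.map]
    exact decide_eq_decide.mpr (by push_cast; omega)

theorem BoutL_cons_nonpos (c : Int) (p : Int × Int) (rest : List (Int × Int)) (hp : ¬ p.2 > 0) :
    BoutL c (p :: rest) = BoutL c rest := by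
  have hS : startsL (p :: rest) = (startsL rest).map (· + 1) := by
    rw [startsL_eq, startsL_eq, sA_cons_nonpos _ _ hp]
  have hE : endsL (p :: rest) = (endsL rest).map (· + 1) := by
    rw [endsL_eq, endsL_eq, eA_cons_nonpos _ _ hp]
  conv_lhs => rw [BoutL, hS, hE]
  exact BoutL_tail c (p :: rest) rest 1 (fun i _ => by simp)

theorem BoutL_run (c : Int) (run rest' : List (Int × Int)) (hne : run ≠ [])
    (hpos : ∀ p ∈ run, p.2 > 0) (hb : FP_bdry rest') :
    BoutL c (run ++ rest') =
      (if (run.length : Int) ≥ c then [(run.getD (run.length - 1) (0, 0)).1] else []) ++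
        BoutL c rest' := by
  have hk : 1 ≤ run.length := List.length_pos_iff.mpr hne
  have hS : startsL (run ++ rest') = 0 :: (startsL rest').map (· + run.length) := by
    rw [startsL_eq, startsL_eq, sA_run run rest' hne hpos hb]
  have hE : endsL (run ++ rest') = (run.length - 1) :: (endsL rest').map (· + run.length) := by
    rw [endsL_eq, endsL_eq, eA_run run rest' hne hpos hb]
  conv_lhs => rw [BoutL, hS, hE]
  rw [List.zip_cons_cons, List.filter_cons]
  have hpred : (decide (((run.length - 1 : Nat) : Int) - ((0 : Nat) : Int) + 1 ≥ c))
      = decide ((run.length : Int) ≥ c) := decide_eq_decide.mpr (by omega)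
  have htail := BoutL_tail c (run ++ rest') rest' run.length (fun i _ => by
    rw [List.getD_append_right _ _ _ _ (by omega)]
    simp)
  have hhead : ((run ++ rest').getD (run.length - 1) (0, 0)).1 = (run.getD (run.length - 1) (0, 0)).1 := by
    rw [List.getD_append _ _ _ _ (by omega)]
  simp only [hpred]
  by_cases hc : (run.length : Int) ≥ c
  · rw [if_pos (by simpa using hc), if_pos hc, List.map_cons, htail, hhead]
    rfl
  · rw [if_neg (by simpa using hc), if_neg hc, htail]
    rfl

-- ---- the main induction: A's loop spec equals the boundary-detection output ----

def FP_inv (c : Int) (l : List (Int × Int)) : Prop :=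
  1 ≤ c ∨ (l ≠ [] ∧ (∀ p ∈ l.head?.toList, 0 < p.2) ∧ (∀ p ∈ l.getLast?.toList, 0 < p.2) ∧
    l.IsChain (fun a b => 0 < a.2 ∨ 0 < b.2))

theorem FP_runs_nil (c : Int) (hinv : FP_inv c []) : FP_spec c [] [] = BoutL c [] := by
  rcases hinv with hc | ⟨hne, _⟩
  · show FP_flush c [] = _
    unfold FP_flush
    rw [if_neg (by simp; omega)]
    rfl
  · exact absurd rfl hne

theorem FP_runs_main (c : Int) : ∀ (n : Nat) (l : List (Int × Int)), l.length ≤ n →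
    FP_inv c l → FP_spec c l [] = BoutL c l := by
  intro n
  induction n with
  | zero =>
    intro l hn hinv
    have hl : l = [] := List.length_eq_zero_iff.mp (Nat.le_zero.mp hn)
    subst hl
    exact FP_runs_nil c hinv
  | succ n ihn =>
    intro l hn hinv
    cases l with
    | nil => exact FP_runs_nil c hinv
    | cons p rest =>
    by_cases hp : p.2 > 0
    · -- maximal positive run at the front
      set run : List (Int × Int) := p :: rest.takeWhile (fun q => decide (q.2 > 0)) with hrun
      set rest' := rest.dropWhile (fun q => decide (q.2 > 0)) with hrest'
      have hsplit : p :: rest = run ++ rest' := by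
        simp [hrun, hrest', List.takeWhile_append_dropWhile]
      have hrne : run ≠ [] := by simp [hrun]
      have hposrun : ∀ q ∈ run, q.2 > 0 := by
        intro q hq
        rcases List.mem_cons.mp (hrun ▸ hq) with rfl | hq'
        · exact hp
        · simpa using List.mem_takeWhile_imp hq'
      have hbd : FP_bdry rest' := by
        rcases h : rest' with _ | ⟨q, t⟩
        · exact Or.inl rfl
        · refine Or.inr ⟨q, t, rfl, ?_⟩
          have h2 := List.head?_dropWhile_not (fun q => decide (q.2 > 0)) rest
          rw [← hrest', h] at h2
          simpa using h2
      have hA : FP_spec c (p :: rest) [] = FP_spec c rest' (run.map Prod.fst) := by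
        rw [hsplit, FP_spec_pos_append c run rest' [] hposrun]
        simp
      have hB : BoutL c (p :: rest) =
          (if (run.length : Int) ≥ c then [(run.getD (run.length - 1) (0, 0)).1] else []) ++
            BoutL c rest' := by
        rw [hsplit]
        exact BoutL_run c run rest' hrne hposrun hbd
      rcases h : rest' with _ | ⟨q, t⟩
      · -- stream ends inside the run
        rw [hA, h]
        show FP_flush c (run.map Prod.fst) = _
        rw [flush_run c run hrne, hB, h]
        simp [BoutL, startsL, endsL]
      · have hq : ¬ q.2 > 0 := by
          rcases hbd with h0 | ⟨q', t', h1, hq'⟩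
          · rw [h] at h0; exact absurd h0 (by simp)
          · rw [h] at h1
            obtain ⟨rfl, rfl⟩ : q' = q ∧ t' = t := by
              constructor <;> [exact (List.cons.injEq .. ▸ h1).1.symm; exact (List.cons.injEq .. ▸ h1).2.symm]
            exact hq'
        have hlen' : run.length + rest'.length = rest.length + 1 := by
          have := congrArg List.length hsplit
          simpa using this.symm
        have htlen : t.length ≤ n := by
          have : rest'.length = t.length + 1 := by rw [h]; simp
          have hr : rest.length ≤ n := by simpa using hn
          omega
        have hinvt : FP_inv c t := by
          rcases hinv with hc | ⟨hne, hhead, hlast, hchain⟩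
          · exact Or.inl hc
          · right
            have hsuffix : rest' <:+ p :: rest :=
              (List.dropWhile_suffix _).trans (List.suffix_cons p rest)
            have hlast' : ∀ x ∈ (q :: t).getLast?.toList, 0 < x.2 := by
              intro x hx
              apply hlast
              rcases hsuffix with ⟨pre, hpre⟩
              rw [← hpre, h, List.getLast?_append_of_ne_nil _ (by simp)]
              exact hx
            have htne : t ≠ [] := by
              intro h0
              subst h0
              exact hq (hlast' q (by simp))
            have hchain' : (q :: t).IsChain (fun a b => 0 < a.2 ∨ 0 < b.2) := by
              have := hchain.suffix hsuffix
              rwa [h] at this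
            refine ⟨htne, ?_, ?_, ?_⟩
            · intro x hx
              rcases ht : t with _ | ⟨t0, tt⟩
              · exact absurd ht htne
              · rw [ht] at hx
                simp only [List.head?_cons, Option.toList_some, List.mem_singleton] at hx
                subst hx
                rcases (List.isChain_cons_cons.mp (ht ▸ hchain')).1 with h0 | h0
                · exact absurd h0 hq
                · exact h0
            · intro x hx
              apply hlast'
              rcases ht : t with _ | ⟨t0, tt⟩
              · exact absurd ht htne
              · rw [List.getLast?_cons_cons]
                rw [ht] at hx
                exact hx
            · exact hchain'.tail
        have hAq : FP_spec c rest' (run.map Prod.fst) =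
            FP_flush c (run.map Prod.fst) ++ FP_spec c t [] := by
          rw [h]
          simp only [FP_spec, if_neg hq]
        rw [hA, hAq, flush_run c run hrne, hB, h, BoutL_cons_nonpos c q t hq,
          ihn t htlen hinvt]
    · -- non-positive head: under the invariant this forces 1 ≤ c
      have hc : 1 ≤ c := by
        rcases hinv with hc | ⟨_, hhead, _, _⟩
        · exact hc
        · exact absurd (hhead p (by simp)) hp
      have hstep : FP_spec c (p :: rest) [] = FP_flush c [] ++ FP_spec c rest [] := by
        simp only [FP_spec, if_neg hp]
      have hfl : FP_flush c [] = [] := by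
        unfold FP_flush
        rw [if_neg (by simp; omega)]
      rw [hstep, hfl, List.nil_append, ihn rest (by simpa using hn) (Or.inl hc),
        BoutL_cons_nonpos c p rest hp]

-- ---- bridge: the port of B computes BoutL on the zipped list ----

theorem FP_alt_eq (positions values : List Int) (c : Int) :
    Finding_Peak_alt positions values c = BoutL c (positions.zip values) := by
  have hlen : min positions.length values.length = (positions.zip values).length := by
    rw [List.length_zip]
  have hpos : ∀ i, (FPB_pos values ((positions.zip values).length)).getD i false
      = posb (positions.zip values) i := by
    intro i
    by_cases hi : i < (positions.zip values).length
    · have hiv : i < values.length := by rw [List.length_zip] at hi; omega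
      have hmap : i < ((List.range ((positions.zip values).length)).map
          (fun i => decide (values.getD i 0 > 0))).length := by simpa using hi
      unfold FPB_pos posb
      rw [List.getD_eq_getElem _ _ hmap, List.getD_eq_getElem _ _ hi]
      simp [List.getElem_zip, List.getElem?_eq_getElem hiv]
    · have h1 : ((List.range ((positions.zip values).length)).map
          (fun i => decide (values.getD i 0 > 0))).length ≤ i := by
        simpa using Nat.le_of_not_lt hi
      unfold FPB_pos posb
      rw [List.getD_eq_default _ _ h1, List.getD_eq_default _ _ (Nat.le_of_not_lt hi)]
      simp
  unfold Finding_Peak_alt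
  dsimp only
  rw [hlen]
  have hstarts : FPB_starts (FPB_pos values ((positions.zip values).length))
      ((positions.zip values).length) = startsL (positions.zip values) := by
    unfold FPB_starts startsL
    exact List.filter_congr (fun i _ => by rw [hpos, hpos])
  have hends : FPB_ends (FPB_pos values ((positions.zip values).length))
      ((positions.zip values).length) = endsL (positions.zip values) := by
    unfold FPB_ends endsL
    exact List.filter_congr (fun i _ => by rw [hpos, hpos])
  rw [hstarts, hends]
  unfold BoutL
  apply List.map_congr_left
  intro se hse
  have h2 : se.2 ∈ endsL (positions.zip values) := by
    obtain ⟨a, b⟩ := se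
    exact (List.of_mem_zip (List.mem_of_mem_filter hse)).2
  have hlt : se.2 < (positions.zip values).length := by
    have := List.mem_of_mem_filter h2
    simpa using this
  have hltp : se.2 < positions.length := by rw [List.length_zip] at hlt; omega
  rw [List.getD_eq_getElem _ _ hltp, List.getD_eq_getElem _ _ hlt]
  simp [List.getElem_zip]

-- ===== VERDICT (by name: the statement is the Claim_ definition above) =====
theorem Finding_Peak_spec : Claim_equal_Finding_Peak := by
  intro positions values cutoff _ hpre
  unfold Spec_Finding_Peak
  rw [FP_alt_eq]
  unfold Finding_Peak
  rw [FP_A_eq_spec cutoff (positions.zip values) [] []]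
  rw [FP_runs_main cutoff (positions.zip values).length (positions.zip values) (le_refl _) hpre]
  simp
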